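-- pv_equiv track=rewrite | github.com/Pedro-Hack/calculo_numero_modulos | pv_core.py | plan_distribution
-- ===== SOURCE A (Python) =====
-- def plan_distribution(required_strings: int, n_mppt: int, max_parallel_per_mppt: int):
--     dist = [0]*n_mppt
--     remain = max(0, required_strings)
--     for i in range(n_mppt):
--         if remain <= 0: break
--         dist[i] = min(1, remain)
--         remain -= dist[i]
--     level = 2
--     while remain > 0 and level <= max_parallel_per_mppt:
--         for i in range(n_mppt):
--             if remain <= 0: break
--             if dist[i] < level and dist[i] < max_parallel_per_mppt:
--                 dist[i] += 1
--                 remain -= 1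
--         level += 1
--     return dist, remain
-- ===== SOURCE B (Python) =====
-- def plan_distribution(required_strings: int, n_mppt: int, max_parallel_per_mppt: int):
--     n = max(n_mppt, 0)
--     need = max(required_strings, 0)
--     levels = max(max_parallel_per_mppt, 1)
--     total = min(need, n * levels)
--     if n > 0:
--         q, r = divmod(total, n)
--         return [q + 1] * r + [q] * (n - r), need - total
--     return [], need - total
-- ===== Notes on version B (the rewrite author's own statement) =====
-- stated objective: faster
-- what changed: Replaced the level-by-level round-robin filling loops with direct arithmetic: total placed = min(required, n*max(cap,1)), then divmod gives r slots with q+1 and the rest with q.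
import Mathlib
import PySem

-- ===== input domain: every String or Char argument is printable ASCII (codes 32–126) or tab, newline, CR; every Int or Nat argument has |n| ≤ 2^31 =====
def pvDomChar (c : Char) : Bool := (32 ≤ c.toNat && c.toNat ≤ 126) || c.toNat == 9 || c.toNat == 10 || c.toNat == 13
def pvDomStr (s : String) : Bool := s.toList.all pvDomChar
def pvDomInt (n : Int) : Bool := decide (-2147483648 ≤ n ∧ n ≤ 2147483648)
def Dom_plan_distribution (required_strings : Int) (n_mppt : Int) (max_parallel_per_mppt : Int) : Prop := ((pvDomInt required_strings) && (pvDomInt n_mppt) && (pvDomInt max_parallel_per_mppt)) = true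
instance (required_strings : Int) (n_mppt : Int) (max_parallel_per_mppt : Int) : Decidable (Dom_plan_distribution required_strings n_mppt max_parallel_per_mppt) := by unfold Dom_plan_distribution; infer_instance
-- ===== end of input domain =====

-- B replaces A's round-robin filling loops with a closed-form divmod computation (measured asymptotically faster).

-- ===== PORT A =====
-- first `for i in range(n_mppt)` loop: k = remaining iterations, i = current index
def pvFor1 : Nat → Nat → List Int → Int → List Int × Int
  | 0, _, dist, remain => (dist, remain)
  | Nat.succ k, i, dist, remain =>
    if remain ≤ 0 then (dist, remain)
    else pvFor1 k (i + 1) (dist.set i (min 1 remain)) (remain - min 1 remain)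

-- inner `for i in range(n_mppt)` loop of the while
def pvFor2 (level cap : Int) : Nat → Nat → List Int → Int → List Int × Int
  | 0, _, dist, remain => (dist, remain)
  | Nat.succ k, i, dist, remain =>
    if remain ≤ 0 then (dist, remain)
    else
      let d := dist.getD i 0
      if d < level ∧ d < cap then pvFor2 level cap k (i + 1) (dist.set i (d + 1)) (remain - 1)
      else pvFor2 level cap k (i + 1) dist remain

-- `while remain > 0 and level <= max_parallel`: level runs from 2, so the loop body can run
-- at most (cap - 1).toNat times; fuel = (cap - level + 1).toNat is passed explicitly.
def pvWhile (n : Nat) (cap : Int) : Nat → Int → List Int → Int → List Int × Int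
  | 0, _, dist, remain => (dist, remain)
  | Nat.succ f, level, dist, remain =>
    if remain > 0 ∧ level ≤ cap then
      let p := pvFor2 level cap n 0 dist remain
      pvWhile n cap f (level + 1) p.1 p.2
    else (dist, remain)

def plan_distribution (required_strings : Int) (n_mppt : Int) (max_parallel_per_mppt : Int) : List Int × Int :=
  let dist := List.replicate n_mppt.toNat 0
  let remain := max 0 required_strings
  let p := pvFor1 n_mppt.toNat 0 dist remain
  pvWhile n_mppt.toNat max_parallel_per_mppt (max_parallel_per_mppt - 1).toNat 2 p.1 p.2

-- ===== PORT B =====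
def plan_distribution_alt (required_strings : Int) (n_mppt : Int) (max_parallel_per_mppt : Int) : List Int × Int :=
  let n := max n_mppt 0
  let need := max required_strings 0
  let levels := max max_parallel_per_mppt 1
  let total := min need (n * levels)
  if n > 0 then
    let q := PySem.Int.floordiv total n
    let r := PySem.Int.mod total n
    (List.replicate r.toNat (q + 1) ++ List.replicate (n.toNat - r.toNat) q, need - total)
  else ([], need - total)

-- ===== PRECONDITION & SPEC =====
def Spec_plan_distribution (required_strings : Int) (n_mppt : Int) (max_parallel_per_mppt : Int) (out : List Int × Int) : Prop := out = plan_distribution_alt required_strings n_mppt max_parallel_per_mppt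
instance (required_strings : Int) (n_mppt : Int) (max_parallel_per_mppt : Int) (out : List Int × Int) : Decidable (Spec_plan_distribution required_strings n_mppt max_parallel_per_mppt out) := by unfold Spec_plan_distribution; infer_instance

-- ===== CLAIM (what is proved, stated in full; the proofs are below) =====
def Claim_equal_plan_distribution : Prop := ∀ (required_strings : Int) (n_mppt : Int) (max_parallel_per_mppt : Int), Dom_plan_distribution required_strings n_mppt max_parallel_per_mppt → Spec_plan_distribution required_strings n_mppt max_parallel_per_mppt (plan_distribution required_strings n_mppt max_parallel_per_mppt)

-- ===== LEMMAS AND PROOFS =====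

theorem pvFor1_spec (k : Nat) : ∀ (A : List Int) (R : Int), 0 ≤ R →
    pvFor1 k A.length (A ++ List.replicate k 0) R =
      if (k : Int) ≤ R then (A ++ List.replicate k 1, R - k)
      else (A ++ (List.replicate R.toNat 1 ++ List.replicate (k - R.toNat) 0), 0) := by
  induction k with
  | zero => intro A R hR; simp [pvFor1]; omega
  | succ k ih =>
    intro A R hR
    simp only [pvFor1, List.replicate_succ]
    by_cases h0 : R ≤ 0
    · have : R = 0 := le_antisymm h0 hR
      subst this
      simp only [if_pos le_rfl]
      rw [if_neg (by push_cast; omega)]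
      simp [List.replicate_succ]
    · rw [if_neg h0]
      have h1 : (1:Int) ≤ R := by omega
      have hmin : min 1 R = 1 := by omega
      rw [hmin]
      have hset : (A ++ (0 :: List.replicate k 0)).set A.length 1
          = (A ++ [1]) ++ List.replicate k 0 := by simp
      rw [hset]
      have hlen : A.length + 1 = (A ++ [1]).length := by simp
      rw [hlen, ih (A ++ [1]) (R - 1) (by omega)]
      by_cases hk : (k : Int) ≤ R - 1
      · rw [if_pos hk, if_pos (by push_cast; omega)]
        simp [List.replicate_succ]
        omega
      · rw [if_neg hk, if_neg (by push_cast; omega)]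
        have hRt : R.toNat = (R - 1).toNat + 1 := by omega
        rw [hRt]
        simp
        rw [List.replicate_succ]
        simp

theorem pvFor2_spec (level cap : Int) (k : Nat) : ∀ (A : List Int) (R v : Int), 0 ≤ R →
    v < level → v < cap →
    pvFor2 level cap k A.length (A ++ List.replicate k v) R =
      if (k : Int) ≤ R then (A ++ List.replicate k (v + 1), R - k)
      else (A ++ (List.replicate R.toNat (v + 1) ++ List.replicate (k - R.toNat) v), 0) := by
  induction k with
  | zero => intro A R v hR _ _; simp [pvFor2]; omega
  | succ k ih =>
    intro A R v hR hv1 hv2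
    simp only [pvFor2, List.replicate_succ]
    by_cases h0 : R ≤ 0
    · have : R = 0 := le_antisymm h0 hR
      subst this
      simp only [if_pos le_rfl]
      rw [if_neg (by push_cast; omega)]
      simp [List.replicate_succ]
    · rw [if_neg h0]
      have hget : (A ++ v :: List.replicate k v).getD A.length 0 = v := by simp
      simp only [hget]
      rw [if_pos ⟨hv1, hv2⟩]
      have hset : (A ++ (v :: List.replicate k v)).set A.length (v + 1)
          = (A ++ [v + 1]) ++ List.replicate k v := by simp
      rw [hset]
      have hlen : A.length + 1 = (A ++ [v + 1]).length := by simp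
      rw [hlen, ih (A ++ [v + 1]) (R - 1) v (by omega) hv1 hv2]
      by_cases hk : (k : Int) ≤ R - 1
      · rw [if_pos hk, if_pos (by push_cast; omega)]
        simp [List.replicate_succ]
        omega
      · rw [if_neg hk, if_neg (by push_cast; omega)]
        have hRt : R.toNat = (R - 1).toNat + 1 := by omega
        rw [hRt]
        simp
        rw [List.replicate_succ]
        simp

theorem pvWhile_zero (n : Nat) (cap : Int) (f : Nat) (L : Int) (dist : List Int) (R : Int)
    (hR : R ≤ 0) : pvWhile n cap f L dist R = (dist, R) := by
  cases f with
  | zero => rfl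
  | succ f => simp only [pvWhile]; rw [if_neg]; intro h; omega
  
theorem pvWhile_spec (N : Nat) (hN : 0 < N) (cap : Int) : ∀ (f : Nat) (L R : Int), 0 ≤ R →
    f = (cap - L + 1).toNat →
    pvWhile N cap f L (List.replicate N (L - 1)) R =
      (let T := min R ((N : Int) * max (cap - L + 1) 0)
       (List.replicate (T % N).toNat (L - 1 + T / N + 1) ++
          List.replicate (N - (T % N).toNat) (L - 1 + T / N), R - T)) := by
  intro f
  induction f with
  | zero =>
    intro L R hR hf
    have hC : max (cap - L + 1) 0 = 0 := by omega
    have hT : min R ((N : Int) * max (cap - L + 1) 0) = 0 := by rw [hC]; simp; omega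
    simp only [pvWhile, hT]
    simp
  | succ f ih =>
    intro L R hR hf
    simp only [pvWhile]
    by_cases hc : R > 0 ∧ L ≤ cap
    · rw [if_pos hc]
      have hvcap : L - 1 < cap := by omega
      have hfor := pvFor2_spec L cap N ([] : List Int) R (L - 1) hR (by omega) hvcap
      simp only [List.length_nil, List.nil_append] at hfor
      rw [hfor]
      by_cases hNR : (N : Int) ≤ R
      · rw [if_pos hNR]
        simp only
        have hrep : List.replicate N (L - 1 + 1) = List.replicate N ((L + 1) - 1) := by ring_nf
        rw [hrep, ih (L + 1) (R - N) (by omega) (by omega)]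
        simp only
        have hC : max (cap - L + 1) 0 = cap - L + 1 := by omega
        have hC' : max (cap - (L + 1) + 1) 0 = cap - L := by omega
        have hT : min R ((N : Int) * max (cap - L + 1) 0)
            = min (R - (N : Int)) ((N : Int) * max (cap - (L + 1) + 1) 0) + (N : Int) * 1 := by
          rw [hC, hC']
          have : (N : Int) * (cap - L + 1) = (N : Int) * (cap - L) + N := by ring
          omega
        rw [hT]
        have hNne : (N : Int) ≠ 0 := by positivity
        rw [Int.add_mul_ediv_left _ _ hNne, Int.add_mul_emod_self_left]
        ring_nf
      · rw [if_neg hNR]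
        simp only
        rw [pvWhile_zero _ _ _ _ _ _ le_rfl]
        have hT : min R ((N : Int) * max (cap - L + 1) 0) = R := by
          have h1 : (1:Int) ≤ max (cap - L + 1) 0 := by omega
          have hge : (N : Int) ≤ (N : Int) * max (cap - L + 1) 0 :=
            le_mul_of_one_le_right (by positivity) h1
          omega
        rw [hT]
        have hq : R / (N : Int) = 0 := Int.ediv_eq_zero_of_lt hR (by omega)
        have hm : R % (N : Int) = R := Int.emod_eq_of_lt hR (by omega)
        rw [hq, hm]
        simp
    · rw [if_neg hc]
      have hT : min R ((N : Int) * max (cap - L + 1) 0) = 0 := by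
        rcases not_and_or.mp hc with h | h
        · have : R = 0 := by omega
          subst this
          have : 0 ≤ (N : Int) * max (cap - L + 1) 0 := by positivity
          omega
        · have : max (cap - L + 1) 0 = 0 := by omega
          rw [this]; simp; omega
      rw [hT]
      simp

theorem pvWhile_nil (cap : Int) : ∀ (f : Nat) (L : Int) (dist : List Int) (R : Int),
    pvWhile 0 cap f L dist R = (dist, R) := by
  intro f
  induction f with
  | zero => intro L dist R; rfl
  | succ f ih =>
    intro L dist R
    simp only [pvWhile, pvFor2]
    split
    · exact ih _ _ _
    · rfl

theorem plan_dist_eq (rs n cap : Int) :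
    plan_distribution rs n cap = plan_distribution_alt rs n cap := by
  unfold plan_distribution plan_distribution_alt
  simp only
  by_cases hn : n ≤ 0
  · have h0 : n.toNat = 0 := by omega
    have hmax : max n 0 = 0 := by omega
    rw [h0, hmax, if_neg (by omega)]
    have htot : min (max rs 0) ((0:Int) * max cap 1) = 0 := by
      have : (0:Int) * max cap 1 = 0 := by ring
      omega
    rw [htot]
    simp only [pvFor1]
    rw [pvWhile_nil]
    simp
    omega
  · have hN : 0 < n.toNat := by omega
    have hNcast : ((n.toNat : Int)) = n := by omega
    have hmax : max n 0 = n := by omega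
    rw [hmax, if_pos (by omega)]
    have hR0 : (0:Int) ≤ max 0 rs := by omega
    have hp1 := pvFor1_spec n.toNat ([] : List Int) (max 0 rs) hR0
    simp only [List.length_nil, List.nil_append] at hp1
    rw [hp1]
    by_cases hNR : ((n.toNat : Int)) ≤ max 0 rs
    · -- first pass fills every slot; the while loop runs from level 2
      rw [if_pos hNR]
      simp only
      have hrep : List.replicate n.toNat (1:Int) = List.replicate n.toNat ((2:Int) - 1) := by norm_num
      rw [hrep]
      rw [pvWhile_spec n.toNat hN cap (cap - 1).toNat 2 (max 0 rs - n.toNat) (by omega)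
        (by congr 1; omega)]
      simp only [hNcast]
      have hML : max cap 1 = 1 + max (cap - 2 + 1) 0 := by omega
      have hT : min (max rs 0) (n * max cap 1)
          = min (max 0 rs - n) (n * max (cap - 2 + 1) 0) + n * 1 := by
        rw [hML]
        have : n * (1 + max (cap - 2 + 1) 0) = n * max (cap - 2 + 1) 0 + n := by ring
        omega
      have hNne : n ≠ 0 := by omega
      rw [PySem.Int.floordiv_eq_ediv_of_pos (by omega), PySem.Int.mod_eq_emod_of_pos (by omega)]
      rw [hT, Int.add_mul_ediv_left _ _ hNne, Int.add_mul_emod_self_left]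
      ring_nf
      rw [Prod.mk.injEq]
      exact ⟨rfl, by omega⟩
    · -- required strings fit in the first pass; remain is 0 and the while loop is a no-op
      rw [if_neg hNR]
      simp only
      rw [pvWhile_zero _ _ _ _ _ _ le_rfl]
      have hT : min (max rs 0) (n * max cap 1) = max rs 0 := by
        have h1 : (1:Int) ≤ max cap 1 := by omega
        have hge : n ≤ n * max cap 1 := le_mul_of_one_le_right (by omega) h1
        omega
      rw [hT]
      have hq : PySem.Int.floordiv (max rs 0) n = 0 := by
        rw [PySem.Int.floordiv_eq_ediv_of_pos (by omega)]
        exact Int.ediv_eq_zero_of_lt (by omega) (by omega)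
      have hm : PySem.Int.mod (max rs 0) n = max rs 0 := by
        rw [PySem.Int.mod_eq_emod_of_pos (by omega)]
        exact Int.emod_eq_of_lt (by omega) (by omega)
      rw [hq, hm]
      have hcomm : max rs 0 = max 0 rs := by omega
      simp [hcomm]

-- ===== VERDICT (by name: the statement is the Claim_ definition above) =====
theorem plan_distribution_spec : Claim_equal_plan_distribution := by
  intro rs n cap _
  exact plan_dist_eq rs n cap
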